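-- pv_equiv track=rewrite | github.com/hqpiotr/learning-python | 2. Python - Rice/c3-dataAnalysis/diagonal_of_matrix.py | fill_in_square_matrix
-- ===== SOURCE A (Python) =====
-- def fill_in_square_matrix(n):
--     matrix = []
--     for row in range(n):
--         values = []
--         for col in range(n):
--             values.append(row * col)
--         matrix.append(values)
--     return matrix
-- ===== SOURCE B (Python) =====
-- def fill_in_square_matrix(n):
--     # Row r equals row r-1 plus [0,1,...,n-1] elementwise, so build rows by
--     # cumulative addition instead of per-cell multiplication.
--     base = list(range(n))
--     acc = [0] * len(base)
--     matrix = []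
--     for _ in range(n):
--         matrix.append(acc)
--         acc = [a + b for a, b in zip(acc, base)]
--     return matrix
-- ===== Notes on version B (the rewrite author's own statement) =====
-- stated objective: alternative
-- what changed: Replaces the nested per-cell multiplication loops by a running-row accumulator: each row is the previous row plus base=[0..n-1] elementwise, appended once per iteration.
import Mathlib
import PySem

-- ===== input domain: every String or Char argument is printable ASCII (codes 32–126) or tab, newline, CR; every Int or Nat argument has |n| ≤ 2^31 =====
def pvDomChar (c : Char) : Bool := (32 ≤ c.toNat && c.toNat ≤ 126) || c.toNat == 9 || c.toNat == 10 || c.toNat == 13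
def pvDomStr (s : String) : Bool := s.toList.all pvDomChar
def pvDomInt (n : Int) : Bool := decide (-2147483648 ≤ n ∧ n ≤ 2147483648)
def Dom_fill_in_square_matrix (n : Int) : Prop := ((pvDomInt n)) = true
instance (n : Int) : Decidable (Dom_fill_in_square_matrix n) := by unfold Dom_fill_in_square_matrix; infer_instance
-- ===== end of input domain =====

-- B builds each row from the previous one by elementwise addition of base=[0..n-1]
-- (cumulative sums) instead of A's per-cell multiplication; same cost, different decomposition.

-- ===== PORT A =====
-- nested loops: for row in range(n): for col in range(n): values.append(row*col)
def fill_in_square_matrix (n : Int) : List (List Int) :=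
  (PySem.List.pyRange 0 n 1).foldl
    (fun matrix row =>
      matrix ++ [(PySem.List.pyRange 0 n 1).foldl (fun values col => values ++ [row * col]) []])
    []

-- ===== PORT B =====
-- acc = [a + b for a, b in zip(acc, base)]
def pvNextRow (base acc : List Int) : List Int := (acc.zip base).map (fun p => p.1 + p.2)

def fill_in_square_matrix_alt (n : Int) : List (List Int) :=
  let base := PySem.List.pyRange 0 n 1
  -- [0] * len(base)
  let acc0 : List Int := List.replicate base.length 0
  ((PySem.List.pyRange 0 n 1).foldl
      (fun (st : List (List Int) × List Int) _ => (st.1 ++ [st.2], pvNextRow base st.2))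
      ([], acc0)).1

-- ===== PRECONDITION & SPEC =====
def Spec_fill_in_square_matrix (n : Int) (out : List (List Int)) : Prop := out = fill_in_square_matrix_alt n
instance (n : Int) (out : List (List Int)) : Decidable (Spec_fill_in_square_matrix n out) := by unfold Spec_fill_in_square_matrix; infer_instance

-- ===== CLAIM (what is proved, stated in full; the proofs are below) =====
def Claim_equal_fill_in_square_matrix : Prop := ∀ (n : Int), Dom_fill_in_square_matrix n → Spec_fill_in_square_matrix n (fill_in_square_matrix n)

-- ===== LEMMAS AND PROOFS =====

-- append-folds are maps
theorem foldl_append_singleton {α β : Type} (f : α → β) (l : List α) (init : List β) :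
    l.foldl (fun acc x => acc ++ [f x]) init = init ++ l.map f := by
  induction l generalizing init with
  | nil => simp
  | cons x t ih => simp [List.foldl_cons, ih]

-- one accumulator update: row a becomes row a+1
theorem zip_map_add (t : List Int) (a : Int) :
    ((t.map (fun c => a * c)).zip t).map (fun p => p.1 + p.2) = t.map (fun c => (a + 1) * c) := by
  induction t with
  | nil => rfl
  | cons b t ih =>
    simp only [List.map_cons, List.zip_cons_cons, List.cons.injEq]
    exact ⟨by ring, ih⟩

theorem pvNextRow_map (base : List Int) (a : Int) :
    pvNextRow base (base.map (fun c => a * c)) = base.map (fun c => (a + 1) * c) := by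
  simpa [pvNextRow] using zip_map_add base a

-- invariant of B's fold: rows are successive multiples of base
theorem alt_fold_inv (base : List Int) (l : List Int) (m0 : List (List Int)) (a : Int) :
    l.foldl (fun (st : List (List Int) × List Int) _ => (st.1 ++ [st.2], pvNextRow base st.2))
        (m0, base.map (fun c => a * c))
      = (m0 ++ (List.range l.length).map (fun (i : Nat) => base.map (fun c => (a + (i : Int)) * c)),
         base.map (fun c => (a + (l.length : Int)) * c)) := by
  induction l generalizing m0 a with
  | nil => simp
  | cons x t ih =>
    simp only [List.foldl_cons, pvNextRow_map, ih (m0 ++ [base.map (fun c => a * c)]) (a + 1),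
      Prod.mk.injEq]
    refine ⟨?_, ?_⟩
    · rw [List.length_cons, List.range_succ_eq_map]
      have h : ∀ i : Nat, base.map (fun c => (a + 1 + (i : Int)) * c)
            = base.map (fun c => (a + ((i : Int) + 1)) * c) := by
        intro i; congr 1; funext c; ring
      simp only [List.map_cons, List.map_map, Function.comp_def, Nat.cast_zero, add_zero,
        Nat.cast_succ, h, List.append_assoc, List.singleton_append]
    · simp only [List.length_cons, Nat.cast_add, Nat.cast_one]
      congr 1; funext c; ring

theorem replicate_eq_map_zero (base : List Int) :
    List.replicate base.length (0 : Int) = base.map (fun c => 0 * c) := by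
  simp [List.map_const']

theorem fill_in_square_matrix_spec : Claim_equal_fill_in_square_matrix := by
  intro n _
  unfold Spec_fill_in_square_matrix fill_in_square_matrix fill_in_square_matrix_alt
  simp only [foldl_append_singleton, List.nil_append, replicate_eq_map_zero,
    alt_fold_inv (PySem.List.pyRange 0 n 1) (PySem.List.pyRange 0 n 1) [] 0]
  rw [PySem.List.pyRange_one 0 n]
  simp [List.map_map, Function.comp_def]
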